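-- pv_equiv track=rewrite | github.com/TreyEverson/CS313E | Reducible.py | is_reducible
-- ===== SOURCE A (Python) =====
-- def hash_word(s, size):
--     hash_idx = 0
--     for i in range(len(s)):
--         letter = ord(s[i]) - 96
--         hash_idx = (hash_idx * 26 + letter) % size
--     return hash_idx
--
-- def step_size(s, const):
--     hash_val = 0
--     pow26 = 1
--     for i in range(len(s) - 1, -1, -1):
--         letter = ord(s[i]) - 96
--         hash_val += pow26 * letter
--         pow26 *= 26
--     return const - (hash_val % const)
--
-- def find_word(s, hash_table):
--     word_index = hash_word(s, len(hash_table))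
--     index = 0
--
--     if hash_table[word_index] == s:
--         return True
--
--     elif hash_table[word_index] == '':
--         return False
--
--     else:
--         step = step_size(s, 13)
--         index = (word_index + step) % len(hash_table)
--         while index != word_index:
--             if hash_table[index] == s:
--                 return True
--             elif hash_table[index] == '':
--                 return False
--             else:
--                 index = (index + step) % len(hash_table)
--     return False
--
-- def removing_one(s, hash_table):
--     words = []
--     for i in range(len(s)):
--         child = s[:i] + s[i + 1:]
--         if find_word(child, hash_table):
--             words.append(child)
--
--     return words
--
-- def is_reducible(s, hash_table, hash_memo):
--     if 'a' not in s and 'i' not in s and 'o' not in s: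
--         return False
--     if len(s) == 2:
--         if 'a' in s or 'i' in s or 'o' in s:
--             hash_memo.append(s)
--             return True
--     for word in removing_one(s, hash_table):
--         return is_reducible(word, hash_table, hash_memo)
--
--     return False
-- ===== SOURCE B (Python) =====
-- # B: iterative rebinding loop instead of tail recursion; hash and step size both
-- # derived from ONE shared base-26 polynomial value (Horner, single forward pass)
-- # instead of A's two separate loops; probing bounded by a for-loop over range(1, n)
-- # (the probe sequence returns to its start after at most n steps, so the bound is
-- # exact); children generated by a prefix/suffix walk with early exit instead of
-- # building the full removing_one list.  Like A, appends the final 2-letter word to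
-- # hash_memo in place (same side effect); the proof is about the return value.
--
-- def _poly_value(s):
--     # sum((ord(s[i]) - 96) * 26**(len(s)-1-i)), by Horner's rule
--     v = 0
--     for ch in s:
--         v = v * 26 + (ord(ch) - 96)
--     return v
--
-- def find_word(s, hash_table):
--     n = len(hash_table)
--     v = _poly_value(s)
--     start = v % n
--     if hash_table[start] == s:
--         return True
--     if hash_table[start] == '':
--         return False
--     step = 13 - v % 13
--     idx = start
--     for _ in range(1, n):
--         idx = (idx + step) % n
--         if idx == start:
--             return False
--         if hash_table[idx] == s:
--             return True
--         if hash_table[idx] == '':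
--             return False
--     return False
--
-- def _first_reducible_child(s, hash_table):
--     pre = ''
--     suf = s
--     while suf:
--         child = pre + suf[1:]
--         if find_word(child, hash_table):
--             return child
--         pre += suf[0]
--         suf = suf[1:]
--     return None
--
-- def is_reducible(s, hash_table, hash_memo):
--     while True:
--         if all(ch not in 'aio' for ch in s):
--             return False
--         if len(s) == 2:
--             hash_memo.append(s)
--             return True
--         child = _first_reducible_child(s, hash_table)
--         if child is None:
--             return False
--         s = child
-- ===== Notes on version B (the rewrite author's own statement) =====
-- stated objective: alternative
-- what changed: is_reducible becomes an iterative rebinding loop; the hash index and probe step are both derived from one shared base-26 polynomial value instead of two separate loops; the open-addressing probe is bounded by a for-loop over range(1, n) instead of an unbounded while; the first reducible child is found by a prefix/suffix walk with early exit instead of building the full removing_one list.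
import Mathlib
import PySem

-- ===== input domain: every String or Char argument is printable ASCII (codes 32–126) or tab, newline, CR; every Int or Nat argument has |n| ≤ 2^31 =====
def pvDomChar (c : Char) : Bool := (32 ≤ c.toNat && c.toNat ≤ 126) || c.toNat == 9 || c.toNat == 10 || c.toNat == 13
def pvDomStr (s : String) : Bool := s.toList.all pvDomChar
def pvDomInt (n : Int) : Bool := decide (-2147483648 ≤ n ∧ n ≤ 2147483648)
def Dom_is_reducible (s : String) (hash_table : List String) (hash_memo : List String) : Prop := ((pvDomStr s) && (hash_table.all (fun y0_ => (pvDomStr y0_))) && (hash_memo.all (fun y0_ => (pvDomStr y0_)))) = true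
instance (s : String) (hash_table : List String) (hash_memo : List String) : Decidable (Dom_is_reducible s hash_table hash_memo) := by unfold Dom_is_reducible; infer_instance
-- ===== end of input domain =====

-- B replaces A's tail recursion by an iterative rebinding loop, derives hash index and
-- probe step from ONE shared base-26 polynomial value (A computes two separate loops),
-- bounds the probe scan by range(1, n) instead of an unbounded while, and finds the
-- first reducible child by a prefix/suffix walk with early exit instead of building the
-- full removing_one list.  Both Pythons append to hash_memo in place (identical side
-- effect); only the RETURN value is proved here.


-- ===== PORT A =====
-- hash_word: forward loop over the characters, reducing mod size at every step
def hash_wordP (s : List Char) (size : Int) : Int :=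
  s.foldl (fun hash_idx c => PySem.Int.mod (hash_idx * 26 + ((c.toNat : Int) - 96)) size) 0

-- step_size: backward loop accumulating (hash_val, pow26)
def step_sizeP (s : List Char) (const : Int) : Int :=
  const - PySem.Int.mod
    ((s.reverse.foldl
        (fun (st : Int × Int) c => (st.1 + st.2 * ((c.toNat : Int) - 96), st.2 * 26)) (0, 1)).1)
    const

-- while index != word_index: … ; fuel = len(hash_table)+1 bounds the probe cycle
def find_word_loop (hash_table : List String) (s : List Char) (word_index step : Int) :
    Int → Nat → Bool
  | _, 0 => false
  | index, fuel + 1 =>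
    if index == word_index then false
    else if PySem.List.pyGetD hash_table index "" == String.ofList s then true
    else if PySem.List.pyGetD hash_table index "" == "" then false
    else find_word_loop hash_table s word_index step
           (PySem.Int.mod (index + step) (hash_table.length : Int)) fuel

def find_wordP (s : List Char) (hash_table : List String) : Bool :=
  let word_index := hash_wordP s (hash_table.length : Int)
  if PySem.List.pyGetD hash_table word_index "" == String.ofList s then true
  else if PySem.List.pyGetD hash_table word_index "" == "" then false
  else
    let step := step_sizeP s 13
    find_word_loop hash_table s word_index step
      (PySem.Int.mod (word_index + step) (hash_table.length : Int)) (hash_table.length + 1)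

-- child = s[:i] + s[i+1:]  (i ∈ range(len(s)); PySem.List.slice is Python's slice)
def childAt (s : List Char) (i : Nat) : List Char :=
  PySem.List.slice s none (some (i : Int)) ++ PySem.List.slice s (some ((i : Int) + 1)) none

def removing_oneP (s : List Char) (hash_table : List String) : List (List Char) :=
  (List.range s.length).foldl
    (fun words i => if find_wordP (childAt s i) hash_table then words ++ [childAt s i] else words)
    []

-- A's recursion: each recursive call is on a child one char shorter; fuel = len(s)+1
def is_reducibleA : Nat → List Char → List String → Bool
  | 0, _, _ => false
  | fuel + 1, s, hash_table =>
    if !PySem.Chars.isIn ['a'] s && !PySem.Chars.isIn ['i'] s && !PySem.Chars.isIn ['o'] s then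
      false
    else if s.length == 2
        && (PySem.Chars.isIn ['a'] s || PySem.Chars.isIn ['i'] s || PySem.Chars.isIn ['o'] s) then
      true  -- hash_memo.append(s): side effect, not part of the return value
    else
      match removing_oneP s hash_table with
      | [] => false
      | word :: _ => is_reducibleA fuel word hash_table

def is_reducible (s : String) (hash_table : List String) (_hash_memo : List String) : Bool :=
  is_reducibleA (s.toList.length + 1) s.toList hash_table

-- ===== PORT B =====
-- _poly_value: one Horner pass; hash index and probe step are both derived from it
def poly_valueB (s : List Char) : Int :=
  s.foldl (fun v c => v * 26 + ((c.toNat : Int) - 96)) 0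

-- for _ in range(1, n): idx = (idx + step) % n; …  (idx carried, updated at loop top)
def probe_loopB (hash_table : List String) (s : List Char) (start step : Int) :
    Int → Nat → Bool
  | _, 0 => false
  | idx, count + 1 =>
    let idx' := PySem.Int.mod (idx + step) (hash_table.length : Int)
    if idx' == start then false
    else if PySem.List.pyGetD hash_table idx' "" == String.ofList s then true
    else if PySem.List.pyGetD hash_table idx' "" == "" then false
    else probe_loopB hash_table s start step idx' count

def find_wordB (s : List Char) (hash_table : List String) : Bool :=
  let v := poly_valueB s
  let start := PySem.Int.mod v (hash_table.length : Int)
  if PySem.List.pyGetD hash_table start "" == String.ofList s then true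
  else if PySem.List.pyGetD hash_table start "" == "" then false
  else probe_loopB hash_table s start (13 - PySem.Int.mod v 13) start (hash_table.length - 1)

-- pre = '' ; while suf: child = pre + suf[1:]; … ; pre += suf[0]; suf = suf[1:]
def first_childB (hash_table : List String) : List Char → List Char → Option (List Char)
  | _, [] => none
  | pre, c :: suf =>
    if find_wordB (pre ++ suf) hash_table then some (pre ++ suf)
    else first_childB hash_table (pre ++ [c]) suf

-- the while True loop; each pass rebinds s to a one-char-shorter child, fuel = len(s)+1
def is_reducibleB : Nat → List Char → List String → Bool
  | 0, _, _ => false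
  | fuel + 1, s, hash_table =>
    if s.all (fun c => !(['a', 'i', 'o'].contains c)) then false
    else if s.length == 2 then true  -- hash_memo.append(s): side effect, not the value
    else
      match first_childB hash_table [] s with
      | none => false
      | some child => is_reducibleB fuel child hash_table

def is_reducible_alt (s : String) (hash_table : List String) (_hash_memo : List String) : Bool :=
  is_reducibleB (s.toList.length + 1) s.toList hash_table

-- ===== PRECONDITION & SPEC =====
-- Pre_ excludes exactly the inputs on which Python A raises (ZeroDivisionError or
-- IndexError from an empty hash_table once find_word is reached, i.e. s contains
-- 'a'/'i'/'o' and len(s) != 2).  Python B raises there too (ZeroDivisionError).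
def Pre_is_reducible (s : String) (hash_table : List String) (hash_memo : List String) : Prop :=
  hash_table ≠ [] ∨
    (PySem.Str.isIn "a" s = false ∧ PySem.Str.isIn "i" s = false ∧ PySem.Str.isIn "o" s = false) ∨
    s.toList.length = 2
instance (s : String) (hash_table : List String) (hash_memo : List String) : Decidable (Pre_is_reducible s hash_table hash_memo) := by unfold Pre_is_reducible; infer_instance

def pvWitness_is_reducible : String × List String × List String := ("oat", ["at", ""], [])

def Spec_is_reducible (s : String) (hash_table : List String) (hash_memo : List String) (out : Bool) : Prop := out = is_reducible_alt s hash_table hash_memo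
instance (s : String) (hash_table : List String) (hash_memo : List String) (out : Bool) : Decidable (Spec_is_reducible s hash_table hash_memo out) := by unfold Spec_is_reducible; infer_instance

-- ===== CLAIM (what is proved, stated in full; the proofs are below) =====
def Claim_equal_is_reducible : Prop := ∀ (s : String) (hash_table : List String) (hash_memo : List String), Dom_is_reducible s hash_table hash_memo → Pre_is_reducible s hash_table hash_memo → Spec_is_reducible s hash_table hash_memo (is_reducible s hash_table hash_memo)

-- ===== LEMMAS AND PROOFS =====
-- 'c in "aio"' for a single character is list membership
theorem isIn_singleton (a : Char) (l : List Char) :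
    PySem.Chars.isIn [a] l = l.contains a := by
  rw [Bool.eq_iff_iff, PySem.Chars.isIn_iff_infix]
  simp [List.singleton_infix_iff]

-- B's all(ch not in 'aio' …) equals A's three-way not-in conjunction
theorem guard_all_eq (l : List Char) :
    (l.all fun c => !(['a', 'i', 'o'].contains c))
      = (!PySem.Chars.isIn ['a'] l && !PySem.Chars.isIn ['i'] l && !PySem.Chars.isIn ['o'] l) := by
  rw [isIn_singleton, isIn_singleton, isIn_singleton, Bool.eq_iff_iff]
  simp only [List.all_eq_true, Bool.not_eq_true', List.contains_eq_mem, Bool.and_eq_true,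
    decide_eq_false_iff_not, List.mem_cons, List.not_mem_nil, or_false]
  constructor
  · intro h
    exact ⟨⟨fun ha => (h 'a' ha) (Or.inl rfl), fun hi => (h 'i' hi) (Or.inr (Or.inl rfl))⟩,
      fun ho => (h 'o' ho) (Or.inr (Or.inr rfl))⟩
  · rintro ⟨⟨ha, hi⟩, ho⟩ x hx
    rintro (rfl | rfl | rfl)
    · exact ha hx
    · exact hi hx
    · exact ho hx

-- A's step-by-step-mod Horner fold equals the plain Horner fold reduced once
theorem foldl_mod_eq (n : Int) (hn : 0 < n) :
    ∀ (l : List Char) (h : Int),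
      l.foldl (fun a c => PySem.Int.mod (a * 26 + ((c.toNat : Int) - 96)) n) (PySem.Int.mod h n)
        = PySem.Int.mod (l.foldl (fun a c => a * 26 + ((c.toNat : Int) - 96)) h) n := by
  intro l
  induction l with
  | nil => intro h; rfl
  | cons c t ih =>
    intro h
    simp only [List.foldl_cons]
    have e : PySem.Int.mod (PySem.Int.mod h n * 26 + ((c.toNat : Int) - 96)) n
        = PySem.Int.mod (h * 26 + ((c.toNat : Int) - 96)) n := by
      rw [PySem.Int.mod_eq_emod_of_pos hn, PySem.Int.mod_eq_emod_of_pos hn,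
        PySem.Int.mod_eq_emod_of_pos hn]
      have m1 : Int.ModEq n (h % n) h := Int.emod_emod_of_dvd h dvd_rfl
      exact (m1.mul_right 26).add_right _
    rw [e, ih]

theorem hashA_eq (s : List Char) (n : Int) (hn : 0 < n) :
    hash_wordP s n = PySem.Int.mod (poly_valueB s) n := by
  have h0 : (0 : Int) = PySem.Int.mod 0 n := by
    rw [PySem.Int.mod_eq_emod_of_pos hn]; simp
  unfold hash_wordP poly_valueB
  conv_lhs => rw [h0]
  rw [foldl_mod_eq n hn s 0]

-- A's backward (value, power) pair fold computes the Horner value of the reversed list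
theorem pairfold_eq :
    ∀ (l : List Char) (a p : Int),
      (l.foldl (fun (st : Int × Int) c => (st.1 + st.2 * ((c.toNat : Int) - 96), st.2 * 26))
          (a, p)).1
        = a + p * (l.reverse.foldl (fun v c => v * 26 + ((c.toNat : Int) - 96)) 0) := by
  intro l
  induction l with
  | nil => intro a p; simp
  | cons c t ih =>
    intro a p
    simp only [List.foldl_cons, List.reverse_cons, List.foldl_append, List.foldl_nil]
    rw [ih]
    ring

theorem step_eq (s : List Char) :
    step_sizeP s 13 = 13 - PySem.Int.mod (poly_valueB s) 13 := by
  unfold step_sizeP poly_valueB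
  rw [pairfold_eq s.reverse 0 1]
  simp

-- B's carried-index probe loop is A's loop started one step later
theorem probe_shift (ht : List String) (s : List Char) (wi step : Int) :
    ∀ (k : Nat) (idx : Int),
      probe_loopB ht s wi step idx k
        = find_word_loop ht s wi step (PySem.Int.mod (idx + step) (ht.length : Int)) k := by
  intro k
  induction k with
  | zero => intro idx; rfl
  | succ k ih =>
    intro idx
    simp only [probe_loopB, find_word_loop]
    by_cases h1 : (PySem.Int.mod (idx + step) (ht.length : Int) == wi) = true
    · rw [if_pos h1, if_pos h1]
    · rw [if_neg h1, if_neg h1]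
      by_cases h2 : (PySem.List.pyGetD ht (PySem.Int.mod (idx + step) (ht.length : Int)) ""
          == String.ofList s) = true
      · rw [if_pos h2, if_pos h2]
      · rw [if_neg h2, if_neg h2]
        by_cases h3 : (PySem.List.pyGetD ht (PySem.Int.mod (idx + step) (ht.length : Int)) ""
            == "") = true
        · rw [if_pos h3, if_pos h3]
        · rw [if_neg h3, if_neg h3]
          exact ih _

-- once the probe index is known to return to word_index within the fuel, the fuel
-- bound is irrelevant
theorem loop_fuel_congr (ht : List String) (s : List Char) (wi step : Int) :
    ∀ (j : Nat) (idx : Int) (f f' : Nat),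
      (fun i => PySem.Int.mod (i + step) (ht.length : Int))^[j] idx = wi →
      j < f → j ≤ f' →
      find_word_loop ht s wi step idx f = find_word_loop ht s wi step idx f' := by
  intro j
  induction j with
  | zero =>
    intro idx f f' hit hf _
    simp only [Function.iterate_zero, id_eq] at hit
    subst hit
    obtain ⟨m, rfl⟩ : ∃ m, f = m + 1 := ⟨f - 1, by omega⟩
    cases f' with
    | zero => simp [find_word_loop]
    | succ m' => simp [find_word_loop]
  | succ j ih =>
    intro idx f f' hit hf hf'
    obtain ⟨m, rfl⟩ : ∃ m, f = m + 1 := ⟨f - 1, by omega⟩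
    obtain ⟨m', rfl⟩ : ∃ m', f' = m' + 1 := ⟨f' - 1, by omega⟩
    simp only [find_word_loop]
    by_cases h1 : (idx == wi) = true
    · simp [h1]
    · simp only [h1]
      by_cases h2 : (PySem.List.pyGetD ht idx "" == String.ofList s) = true
      · simp [h2]
      · simp only [h2]
        by_cases h3 : (PySem.List.pyGetD ht idx "" == "") = true
        · simp [h3]
        · simp only [h3, Bool.false_eq_true, if_false]
          exact ih _ m m' (by rw [← Function.iterate_succ_apply]; exact hit)
            (by omega) (by omega)

-- the j-th probe index in closed form
theorem iterate_probe (n step wi : Int) (hn : 0 < n) :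
    ∀ (j : Nat),
      (fun i => PySem.Int.mod (i + step) n)^[j] (PySem.Int.mod (wi + step) n)
        = PySem.Int.mod (wi + ((j : Int) + 1) * step) n := by
  intro j
  induction j with
  | zero => norm_num
  | succ j ih =>
    simp only [Function.iterate_succ_apply']
    rw [ih]
    rw [PySem.Int.mod_eq_emod_of_pos hn, PySem.Int.mod_eq_emod_of_pos hn,
      PySem.Int.mod_eq_emod_of_pos hn, Int.emod_add_emod]
    congr 1
    push_cast
    ring

theorem find_word_eq (s : List Char) (ht : List String) (hne : ht ≠ []) :
    find_wordP s ht = find_wordB s ht := by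
  have hlen : 0 < ht.length := List.length_pos_iff.mpr hne
  have hn : (0 : Int) < (ht.length : Int) := by exact_mod_cast hlen
  simp only [find_wordP, find_wordB]
  rw [hashA_eq s (ht.length : Int) hn, step_eq s]
  set v := poly_valueB s with hv
  set wi := PySem.Int.mod v (ht.length : Int) with hwi
  set st := 13 - PySem.Int.mod v 13 with hst
  by_cases h1 : (PySem.List.pyGetD ht wi "" == String.ofList s) = true
  · simp [h1]
  · simp only [h1, Bool.false_eq_true, if_false]
    by_cases h2 : (PySem.List.pyGetD ht wi "" == "") = true
    · simp [h2]
    · simp only [h2, Bool.false_eq_true, if_false]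
      rw [probe_shift]
      have hwi_mod : PySem.Int.mod (wi + (ht.length : Int) * st) (ht.length : Int) = wi := by
        rw [PySem.Int.mod_eq_emod_of_pos hn, hwi, PySem.Int.mod_eq_emod_of_pos hn,
          Int.add_mul_emod_self_left]
        exact Int.emod_emod_of_dvd v dvd_rfl
      have hit : (fun i => PySem.Int.mod (i + st) (ht.length : Int))^[ht.length - 1]
          (PySem.Int.mod (wi + st) (ht.length : Int)) = wi := by
        rw [iterate_probe _ _ _ hn]
        have hc : ((ht.length - 1 : Nat) : Int) + 1 = (ht.length : Int) := by omega
        rw [hc, hwi_mod]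
      exact loop_fuel_congr ht s wi st (ht.length - 1) _ (ht.length + 1) (ht.length - 1)
        hit (by omega) (le_refl _)

-- child construction in take/drop form
theorem childAt_take_drop (s : List Char) (i : Nat) :
    childAt s i = s.take i ++ s.drop (i + 1) := by
  unfold childAt
  rw [PySem.List.slice_to_natCast]
  have h : ((i : Int) + 1) = ((i + 1 : Nat) : Int) := by push_cast; ring
  rw [h, PySem.List.slice_from_natCast]

-- A's removing_one is filter-then-map over the child indices (loop-shape lemma, cited)
theorem removing_oneP_eq (s : List Char) (ht : List String) :
    removing_oneP s ht
      = ((List.range s.length).filter (fun i => find_wordP (childAt s i) ht)).map (childAt s) := by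
  unfold removing_oneP
  exact PySem.List.foldl_append_if (fun i => find_wordP (childAt s i) ht) (childAt s) _ []

-- B's prefix/suffix walk returns the first surviving child of the index scan
theorem first_childB_eq (ht : List String) :
    ∀ (suf pre : List Char),
      first_childB ht pre suf
        = (((List.range suf.length).map (fun i => pre ++ (suf.take i ++ suf.drop (i + 1)))).filter
            (fun c => find_wordB c ht)).head? := by
  intro suf
  induction suf with
  | nil => intro pre; rfl
  | cons c t ih =>
    intro pre
    have hlist : ((List.range (c :: t).length).map
          (fun i => pre ++ ((c :: t).take i ++ (c :: t).drop (i + 1))))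
        = (pre ++ t)
            :: (List.range t.length).map (fun i => (pre ++ [c]) ++ (t.take i ++ t.drop (i + 1))) := by
      simp only [List.length_cons, List.range_succ_eq_map, List.map_cons, List.map_map]
      rw [show pre ++ ((c :: t).take 0 ++ (c :: t).drop (0 + 1)) = pre ++ t by simp]
      have hmap : (List.range t.length).map
            ((fun i => pre ++ ((c :: t).take i ++ (c :: t).drop (i + 1))) ∘ Nat.succ)
          = (List.range t.length).map
            (fun i => (pre ++ [c]) ++ (t.take i ++ t.drop (i + 1))) := by
        apply List.map_congr_left
        intro i _
        simp [List.take_succ_cons, List.drop_succ_cons, List.append_assoc]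
      rw [hmap]
    rw [hlist, List.filter_cons]
    by_cases h : find_wordB (pre ++ t) ht
    · simp [first_childB, h]
    · simp only [first_childB, h, Bool.false_eq_true, if_false]
      exact ih (pre ++ [c])

-- link: B's first child is the head of A's removing_one list
theorem first_child_head (s : List Char) (ht : List String) (hne : ht ≠ []) :
    first_childB ht [] s = (removing_oneP s ht).head? := by
  rw [first_childB_eq, removing_oneP_eq]
  have hmap : (List.range s.length).map (fun i => [] ++ (s.take i ++ s.drop (i + 1)))
      = (List.range s.length).map (childAt s) := by
    apply List.map_congr_left
    intro i _
    rw [childAt_take_drop, List.nil_append]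
  rw [hmap, List.filter_map]
  have hfilter : ((List.range s.length).filter ((fun c => find_wordB c ht) ∘ childAt s))
      = ((List.range s.length).filter (fun i => find_wordP (childAt s i) ht)) := by
    apply List.filter_congr
    intro i _
    simp [Function.comp, find_word_eq _ ht hne]
  rw [hfilter]

-- main induction: A's recursion equals B's loop, level by level (nonempty table)
theorem is_reducibleAB (ht : List String) (hne : ht ≠ []) :
    ∀ (fuel : Nat) (s : List Char), is_reducibleA fuel s ht = is_reducibleB fuel s ht := by
  intro fuel
  induction fuel with
  | zero => intro s; rfl
  | succ n ih =>
    intro s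
    simp only [is_reducibleA, is_reducibleB, guard_all_eq]
    by_cases hv : (!PySem.Chars.isIn ['a'] s && !PySem.Chars.isIn ['i'] s
        && !PySem.Chars.isIn ['o'] s) = true
    · simp [hv]
    · have hvor : (PySem.Chars.isIn ['a'] s || PySem.Chars.isIn ['i'] s
          || PySem.Chars.isIn ['o'] s) = true := by
        revert hv
        cases PySem.Chars.isIn ['a'] s <;> cases PySem.Chars.isIn ['i'] s <;>
          cases PySem.Chars.isIn ['o'] s <;> simp
      simp only [hv, Bool.false_eq_true, if_false, hvor, Bool.and_true]
      by_cases hl : (s.length == 2) = true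
      · simp [hl]
      · simp only [hl, Bool.false_eq_true, if_false]
        have hh := first_child_head s ht hne
        cases hcase : removing_oneP s ht with
        | nil => rw [hcase] at hh; simp at hh; simp [hh]
        | cons w rest =>
          rw [hcase] at hh
          simp only [List.head?_cons] at hh
          simp [hh, ih]

-- ===== VERDICT (by name: the statement is the Claim_ definition above) =====
theorem is_reducible_spec : Claim_equal_is_reducible := by
  intro s ht memo _ hpre
  unfold Spec_is_reducible is_reducible is_reducible_alt
  rcases Classical.em (ht = []) with rfl | hne
  · -- empty table: Pre_ says s has no vowel or len 2; both return in the first step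
    rcases hpre with hpre | hnv | hl2
    · exact absurd rfl hpre
    · obtain ⟨ha, hi, ho⟩ := hnv
      have ha' : PySem.Chars.isIn ['a'] s.toList = false := by
        simpa [PySem.Str.isIn, show "a".toList = ['a'] from rfl] using ha
      have hi' : PySem.Chars.isIn ['i'] s.toList = false := by
        simpa [PySem.Str.isIn, show "i".toList = ['i'] from rfl] using hi
      have ho' : PySem.Chars.isIn ['o'] s.toList = false := by
        simpa [PySem.Str.isIn, show "o".toList = ['o'] from rfl] using ho
      have hv : (!PySem.Chars.isIn ['a'] s.toList && !PySem.Chars.isIn ['i'] s.toList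
          && !PySem.Chars.isIn ['o'] s.toList) = true := by rw [ha', hi', ho']; rfl
      simp only [is_reducibleA, is_reducibleB]
      rw [guard_all_eq, if_pos hv, if_pos hv]
    · have hc : (s.toList.length == 2) = true := by simp [hl2]
      by_cases hv : (!PySem.Chars.isIn ['a'] s.toList && !PySem.Chars.isIn ['i'] s.toList
          && !PySem.Chars.isIn ['o'] s.toList) = true
      · simp only [is_reducibleA, is_reducibleB]
        rw [guard_all_eq, if_pos hv, if_pos hv]
      · have hvor : (PySem.Chars.isIn ['a'] s.toList || PySem.Chars.isIn ['i'] s.toList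
            || PySem.Chars.isIn ['o'] s.toList) = true := by
          revert hv
          cases PySem.Chars.isIn ['a'] s.toList <;> cases PySem.Chars.isIn ['i'] s.toList <;>
            cases PySem.Chars.isIn ['o'] s.toList <;> simp
        have hca : (s.toList.length == 2
            && (PySem.Chars.isIn ['a'] s.toList || PySem.Chars.isIn ['i'] s.toList
              || PySem.Chars.isIn ['o'] s.toList)) = true := by rw [hc, hvor]; rfl
        simp only [is_reducibleA, is_reducibleB]
        rw [guard_all_eq, if_neg hv, if_neg hv, if_pos hca, if_pos hc]
  · exact is_reducibleAB ht hne _ _
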